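-- pv_equiv track=rewrite | github.com/Nokix/CodeChamps | excercises/look_and_say.py | count_repeat_first
-- ===== SOURCE A (Python) =====
-- def count_repeat_first(s):
--     if not s:
--         return 0
--     first_letter = s[0]
--     count = 1
--     for c in s[1:]:
--         if c == first_letter:
--             count += 1
--         else:
--             break
--     return count
-- ===== SOURCE B (Python) =====
-- def count_repeat_first(s):
--     # Strip every leading copy of the first character; the drop in length
--     # is exactly the size of the leading run.
--     return len(s) - len(s.lstrip(s[0])) if s else 0
-- ===== Notes on version B (the rewrite author's own statement) =====
-- stated objective: simpler
-- what changed: Replaces A's counting loop with break by a loop-free length subtraction: strip all leading copies of s[0] with str.lstrip and return how much shorter the string got (0 for empty input).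
import Mathlib
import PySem

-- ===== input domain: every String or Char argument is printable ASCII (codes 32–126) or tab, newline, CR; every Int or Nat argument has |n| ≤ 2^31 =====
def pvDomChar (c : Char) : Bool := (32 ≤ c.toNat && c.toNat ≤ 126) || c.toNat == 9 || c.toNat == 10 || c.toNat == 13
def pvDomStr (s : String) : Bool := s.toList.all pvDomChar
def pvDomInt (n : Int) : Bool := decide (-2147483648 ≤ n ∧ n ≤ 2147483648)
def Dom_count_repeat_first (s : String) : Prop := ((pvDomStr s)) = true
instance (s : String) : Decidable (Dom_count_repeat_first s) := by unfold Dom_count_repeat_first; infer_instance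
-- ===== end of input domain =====

-- B replaces A's counting loop with a loop-free length subtraction (len(s) - len(s.lstrip(s[0]))); simpler, same result.
-- ===== PORT A =====
-- the for-loop over s[1:] with break, as structural recursion over the same state (count)
def pvLoopA (first : Char) (count : Int) : List Char → Int
  | [] => count
  | c :: rest => if c == first then pvLoopA first (count + 1) rest else count

def count_repeat_first (s : String) : Int :=
  match s.toList with
  | [] => 0
  | first :: rest => pvLoopA first 1 rest

-- ===== PORT B =====
-- s.lstrip(chars) with chars = the single character s[0]: drop the leading characters contained in
-- the set {s[0]} — hand port (exact: Python's lstrip(chars) removes exactly the maximal leading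
-- block of characters belonging to chars, here the single char c)
def pvLstripChar (c : Char) (l : List Char) : List Char := l.dropWhile (fun x => x == c)

def count_repeat_first_alt (s : String) : Int :=
  match s.toList with
  | [] => 0
  | c :: _ => Int.ofNat s.toList.length - Int.ofNat (pvLstripChar c s.toList).length

-- ===== PRECONDITION & SPEC =====
def Spec_count_repeat_first (s : String) (out : Int) : Prop := out = count_repeat_first_alt s
instance (s : String) (out : Int) : Decidable (Spec_count_repeat_first s out) := by unfold Spec_count_repeat_first; infer_instance

-- ===== CLAIM =====
def Claim_equal_count_repeat_first : Prop := ∀ (s : String), Dom_count_repeat_first s → Spec_count_repeat_first s (count_repeat_first s)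

-- ===== LEMMAS AND PROOFS =====
theorem pvLoopA_takeWhile (f : Char) (l : List Char) (k : Int) :
    pvLoopA f k l = k + Int.ofNat ((l.takeWhile (fun x => x == f)).length) := by
  induction l generalizing k with
  | nil => simp [pvLoopA]
  | cons c rest ih =>
    by_cases h : c == f
    · simp [pvLoopA, h, List.takeWhile, ih]; omega
    · simp [pvLoopA, h, List.takeWhile]

theorem length_split (p : Char → Bool) (l : List Char) :
    l.length = (l.takeWhile p).length + (l.dropWhile p).length := by
  conv_lhs => rw [← List.takeWhile_append_dropWhile (p := p) (l := l)]
  exact List.length_append ..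

-- ===== VERDICT =====
theorem count_repeat_first_spec : Claim_equal_count_repeat_first := by
  intro s _
  unfold Spec_count_repeat_first count_repeat_first count_repeat_first_alt
  cases h : s.toList with
  | nil => rfl
  | cons c rest =>
    show pvLoopA c 1 rest = Int.ofNat (c :: rest).length - Int.ofNat (pvLstripChar c (c :: rest)).length
    have hs := length_split (fun x => x == c) rest
    simp only [pvLoopA_takeWhile, pvLstripChar, List.dropWhile_cons, beq_self_eq_true, if_true,
      List.length_cons, Int.ofNat_eq_natCast] at *
    push_cast at *
    omega
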